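-- pv_equiv track=rewrite | github.com/morowenka/DefensiveTokens | src/model.py | recursive_filter
-- ===== SOURCE A (Python) =====
-- def _build_defensive_token_names(num_tokens):
--     return [f"[DefensiveToken{i}]" for i in range(num_tokens)]
--
-- FILTERED_BASE_TOKENS = ["[INST]", "[INPT]", "[RESP]", "[MARK]", "[COLN]", "##"]
--
-- def recursive_filter(text, filters=None):
--     """Remove all special/filtered tokens from untrusted text."""
--     if filters is None:
--         filters = FILTERED_BASE_TOKENS + _build_defensive_token_names(10)
--     orig = text
--     for f in filters:
--         text = text.replace(f, "")
--     if text != orig: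
--         return recursive_filter(text, filters)
--     return text
-- ===== SOURCE B (Python) =====
-- def _build_defensive_token_names(num_tokens):
--     return [f"[DefensiveToken{i}]" for i in range(num_tokens)]
--
-- FILTERED_BASE_TOKENS = ["[INST]", "[INPT]", "[RESP]", "[MARK]", "[COLN]", "##"]
--
-- def recursive_filter(text, filters=None):
--     """Remove all special/filtered tokens from untrusted text."""
--     if filters is None:
--         filters = FILTERED_BASE_TOKENS + _build_defensive_token_names(10)
--     while True:
--         prev = text
--         for f in filters:
--             text = text.replace(f, "")
--         if text == prev:
--             return text
-- ===== Notes on version B (the rewrite author's own statement) =====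
-- stated objective: idiomatic
-- what changed: The tail-recursive fixpoint is rewritten as an explicit iterative while-loop that saves the previous text, runs the same filter-replacement pass, and stops when a pass makes no change; same pass order and semantics, no recursion depth limit.
import Mathlib
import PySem

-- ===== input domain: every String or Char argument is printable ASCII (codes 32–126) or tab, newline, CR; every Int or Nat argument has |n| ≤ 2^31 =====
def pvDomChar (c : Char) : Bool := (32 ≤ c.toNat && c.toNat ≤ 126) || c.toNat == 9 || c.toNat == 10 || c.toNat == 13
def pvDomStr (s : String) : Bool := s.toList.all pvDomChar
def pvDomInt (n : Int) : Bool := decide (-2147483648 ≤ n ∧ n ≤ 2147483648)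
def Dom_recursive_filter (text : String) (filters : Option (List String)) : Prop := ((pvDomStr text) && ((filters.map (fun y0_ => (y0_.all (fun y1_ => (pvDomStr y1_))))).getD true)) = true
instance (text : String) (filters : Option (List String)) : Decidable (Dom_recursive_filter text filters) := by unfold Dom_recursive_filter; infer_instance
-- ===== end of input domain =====

-- B rewrites A's tail recursion as an explicit while-loop until fixpoint (idiomatic, same pass semantics).

-- ===== PORT A =====
-- FILTERED_BASE_TOKENS (module constant, shared by both Pythons)
def pvBaseTokens : List String := ["[INST]", "[INPT]", "[RESP]", "[MARK]", "[COLN]", "##"]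

-- _build_defensive_token_names (module helper, shared by both Pythons)
def pvBuildDefensiveTokenNames (num_tokens : Int) : List String :=
  (PySem.List.pyRange 0 num_tokens 1).map (fun i => "[DefensiveToken" ++ PySem.Int.toStr i ++ "]")

-- A's 'for f in filters: text = text.replace(f, "")' as structural recursion on the filter list
def pvApplyFiltersA : List String → String → String
  | [], t => t
  | f :: fs, t => pvApplyFiltersA fs (PySem.Str.replace t f "")

-- termination lemmas for the port's recursion: one replacement pass either leaves the
-- text unchanged or strictly shortens it
lemma pvGo_cases (old : List Char) (hold : old ≠ []) :
    ∀ (fuel : Nat) (l acc : List Char),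
      PySem.Chars.replace.go old [] fuel l acc = acc.reverse ++ l ∨
      (PySem.Chars.replace.go old [] fuel l acc).length < acc.length + l.length := by
  intro fuel
  induction fuel with
  | zero =>
    intro l acc
    left
    rw [PySem.Chars.replace.go]
  | succ n ih =>
    intro l acc
    cases l with
    | nil =>
      left
      rw [PySem.Chars.replace.go]
      · simp
      · omega
    | cons c t =>
      rw [PySem.Chars.replace.go]
      have hlen : 0 < old.length := List.length_pos_iff.mpr hold
      by_cases hp : old.isPrefixOf (c :: t) = true
      · have hple : old.length ≤ (c :: t).length :=
          (List.isPrefixOf_iff_prefix.mp hp).length_le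
        rw [if_pos hp]
        have hd : (List.drop old.length (c :: t)).length = (c :: t).length - old.length := by
          simp
        simp only [List.reverse_nil, List.nil_append]
        rcases ih ((c :: t).drop old.length) acc with h | h
        · right
          rw [h]
          simp only [List.length_append, List.length_reverse]
          simp only [List.length_cons] at hple hd ⊢
          omega
        · right
          simp only [List.length_cons] at hple hd ⊢
          omega
      · rw [if_neg hp]
        rcases ih t (c :: acc) with h | h
        · left
          rw [h]
          simp
        · right
          simp only [List.length_cons] at h ⊢
          omega

lemma pvReplace_cases (t f : String) :
    PySem.Str.replace t f "" = t ∨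
    (PySem.Str.replace t f "").toList.length < t.toList.length := by
  have htl : (PySem.Str.replace t f "").toList
      = PySem.Chars.replace t.toList f.toList [] := by
    simp [PySem.Str.toList_replace]
  by_cases hf : f.toList = []
  · left
    apply String.toList_inj.mp
    rw [htl, hf]
    simp [PySem.Chars.replace]
  · have hrep : PySem.Chars.replace t.toList f.toList []
        = PySem.Chars.replace.go f.toList [] t.toList.length t.toList [] := by
      rw [PySem.Chars.replace]
      simp [List.isEmpty_iff, hf]
    rcases pvGo_cases f.toList hf t.toList.length t.toList [] with h | h
    · left
      apply String.toList_inj.mp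
      rw [htl, hrep, h]
      simp
    · right
      rw [htl, hrep]
      simpa using h

lemma pvApplyA_cases (fs : List String) :
    ∀ t : String, pvApplyFiltersA fs t = t ∨
      (pvApplyFiltersA fs t).toList.length < t.toList.length := by
  induction fs with
  | nil => intro t; left; rfl
  | cons f fs ih =>
    intro t
    have hstep : pvApplyFiltersA (f :: fs) t = pvApplyFiltersA fs (PySem.Str.replace t f "") := rfl
    rcases pvReplace_cases t f with h1 | h1 <;>
      rcases ih (PySem.Str.replace t f "") with h2 | h2
    · left; rw [hstep, h2, h1]
    · right; rw [hstep, h1]; rw [h1] at h2; exact h2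
    · right; rw [hstep, h2]; exact h1
    · right; rw [hstep]; exact h2.trans h1

-- A's recursion: apply one pass; if the text changed, recurse
def pvRecurseA (filters : List String) (text : String) : String :=
  let text' := pvApplyFiltersA filters text
  if h : text' ≠ text then pvRecurseA filters text'
  else text'
termination_by text.toList.length
decreasing_by
  rcases pvApplyA_cases filters text with hc | hc
  · exact absurd hc h
  · exact hc

def recursive_filter (text : String) (filters : Option (List String)) : String :=
  match filters with
  | none => pvRecurseA (pvBaseTokens ++ pvBuildDefensiveTokenNames 10) text
  | some fs => pvRecurseA fs text

-- ===== PORT B =====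
-- B's inner 'for f in filters' pass, written as a fold
def pvPassB (filters : List String) (text : String) : String :=
  filters.foldl (fun t f => PySem.Str.replace t f "") text

-- B's 'while True: prev = text; <pass>; if text == prev: break' loop; the fuel
-- text.length + 1 only makes the loop total (each changing pass strictly shortens
-- the text, so the fuel is never exhausted)
def pvLoopB (filters : List String) : Nat → String → String
  | 0, text => text
  | Nat.succ n, text =>
    let prev := text
    let text := pvPassB filters text
    if text == prev then text else pvLoopB filters n text

def recursive_filter_alt (text : String) (filters : Option (List String)) : String :=
  let fs := filters.getD (pvBaseTokens ++ pvBuildDefensiveTokenNames 10)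
  pvLoopB fs (text.toList.length + 1) text

-- ===== PRECONDITION & SPEC =====
def Spec_recursive_filter (text : String) (filters : Option (List String)) (out : String) : Prop := out = recursive_filter_alt text filters
instance (text : String) (filters : Option (List String)) (out : String) : Decidable (Spec_recursive_filter text filters out) := by unfold Spec_recursive_filter; infer_instance

-- ===== CLAIM (what is proved, stated in full; the proofs are below) =====
def Claim_equal_recursive_filter : Prop := ∀ (text : String) (filters : Option (List String)), Dom_recursive_filter text filters → Spec_recursive_filter text filters (recursive_filter text filters)

-- ===== LEMMAS AND PROOFS =====
lemma pvApplyA_eq_pass (fs : List String) :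
    ∀ t : String, pvApplyFiltersA fs t = pvPassB fs t := by
  induction fs with
  | nil => intro t; rfl
  | cons f fs ih =>
    intro t
    show pvApplyFiltersA fs (PySem.Str.replace t f "") = _
    rw [ih]
    rfl

lemma pvRecurseA_eq_loopB (fs : List String) :
    ∀ (n : Nat) (t : String), t.toList.length < n → pvRecurseA fs t = pvLoopB fs n t := by
  intro n
  induction n with
  | zero => intro t h; exact absurd h (Nat.not_lt_zero _)
  | succ n ih =>
    intro t ht
    rw [pvRecurseA]
    simp only [pvLoopB, beq_iff_eq]
    by_cases hc : pvPassB fs t = t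
    · simp [pvApplyA_eq_pass, hc]
    · have hlt : (pvPassB fs t).toList.length < t.toList.length := by
        rcases pvApplyA_cases fs t with h | h
        · rw [pvApplyA_eq_pass] at h; exact absurd h hc
        · rwa [pvApplyA_eq_pass] at h
      simp only [pvApplyA_eq_pass]
      rw [dif_pos hc, if_neg hc]
      exact ih (pvPassB fs t) (by omega)

-- ===== VERDICT (by name: the statement is the Claim_ definition above) =====
theorem recursive_filter_spec : Claim_equal_recursive_filter := by
  intro text filters _
  show recursive_filter text filters = recursive_filter_alt text filters
  cases filters with
  | none =>
    exact pvRecurseA_eq_loopB _ _ text (Nat.lt_succ_self _)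
  | some fs =>
    exact pvRecurseA_eq_loopB fs _ text (Nat.lt_succ_self _)
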